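-- pv_equiv track=rewrite | github.com/filippovarini/sharktrack | utils/image_processor.py | construct_label_color_mapping
-- ===== SOURCE A (Python) =====
-- def construct_label_color_mapping(labels, colors):
--     if labels is None:
--         return None
--     label_color_mapping = {}
--     for l in labels:
--         if l not in label_color_mapping:
--             label_color_mapping[l] = colors[len(label_color_mapping) % len(colors)]
--
--     return label_color_mapping
-- ===== SOURCE B (Python) =====
-- def construct_label_color_mapping(labels, colors):
--     if labels is None:
--         return None
--     mapping = {}
--     rest = list(labels)
--     k = 0
--     while rest:
--         head = rest[0]
--         mapping[head] = colors[k % len(colors)]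
--         rest = [l for l in rest[1:] if l != head]
--         k += 1
--     return mapping
-- ===== Notes on version B (the rewrite author's own statement) =====
-- stated objective: alternative
-- what changed: B replaces A's single membership-testing pass over labels by a worklist algorithm: it repeatedly peels the first remaining label, assigns it the k-th cycling colour, and filters every later duplicate of it out of the worklist, so no lookup against the mapping under construction is ever made.
import Mathlib
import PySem

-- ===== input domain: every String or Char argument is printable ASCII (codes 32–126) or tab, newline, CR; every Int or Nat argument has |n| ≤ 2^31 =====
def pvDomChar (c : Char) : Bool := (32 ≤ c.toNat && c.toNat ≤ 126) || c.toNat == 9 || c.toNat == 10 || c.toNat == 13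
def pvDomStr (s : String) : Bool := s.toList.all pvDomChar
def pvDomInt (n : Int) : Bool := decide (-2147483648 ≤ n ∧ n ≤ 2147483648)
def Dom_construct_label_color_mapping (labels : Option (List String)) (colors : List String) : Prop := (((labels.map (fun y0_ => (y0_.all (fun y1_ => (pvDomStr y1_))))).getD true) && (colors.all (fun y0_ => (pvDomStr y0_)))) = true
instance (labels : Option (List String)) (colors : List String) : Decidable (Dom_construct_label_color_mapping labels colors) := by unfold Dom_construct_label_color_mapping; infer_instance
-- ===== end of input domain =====

-- B replaces A's membership-testing pass by a worklist algorithm (peel the first remaining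
-- label, colour it, filter its duplicates out of the worklist); objective: alternative, same results.

-- ===== PORT A =====
def construct_label_color_mapping (labels : Option (List String)) (colors : List String) : Option (List (String × String)) :=
  match labels with
  | none => none
  | some ls =>
    some ((ls.foldl (fun d l =>
        if !(d.contains l) then
          d.insert l (PySem.List.pyGetD colors (PySem.Int.mod (d.size : Int) (colors.length : Int)) "")
        else d)
      (PySem.Dict.empty : PySem.Dict String String)).items)

-- ===== PORT B =====
-- the 'while rest:' loop of Source B as the obvious structural recursion on the worklist
def pvWorklist (colors : List String) : List String → Int → PySem.Dict String String → PySem.Dict String String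
  | [], _, m => m
  | h :: t, k, m =>
      pvWorklist colors (t.filter (fun l => !(l == h))) (k + 1)
        (m.insert h (PySem.List.pyGetD colors (PySem.Int.mod k (colors.length : Int)) ""))
  termination_by rest => rest.length
  decreasing_by
    simp only [List.unattach_filter, List.unattach_attach, List.length_cons]
    have h1 := List.length_filter_le (fun x => !(x == h)) t
    omega

def construct_label_color_mapping_alt (labels : Option (List String)) (colors : List String) : Option (List (String × String)) :=
  match labels with
  | none => none
  | some ls => some ((pvWorklist colors ls 0 (PySem.Dict.empty : PySem.Dict String String)).items)

-- ===== PRECONDITION & SPEC =====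
-- Pre_ excludes only the inputs where Python A raises ZeroDivisionError:
-- colors empty while labels is a non-empty list (B raises there too).
def Pre_construct_label_color_mapping (labels : Option (List String)) (colors : List String) : Prop :=
  labels = none ∨ labels = some [] ∨ colors ≠ []
instance (labels : Option (List String)) (colors : List String) : Decidable (Pre_construct_label_color_mapping labels colors) := by unfold Pre_construct_label_color_mapping; infer_instance

def pvWitness_construct_label_color_mapping : Option (List String) × List String :=
  (some ["shark", "ray", "shark"], ["red", "green"])

def Spec_construct_label_color_mapping (labels : Option (List String)) (colors : List String) (out : Option (List (String × String))) : Prop := out = construct_label_color_mapping_alt labels colors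
instance (labels : Option (List String)) (colors : List String) (out : Option (List (String × String))) : Decidable (Spec_construct_label_color_mapping labels colors out) := by unfold Spec_construct_label_color_mapping; infer_instance

-- ===== CLAIM (what is proved, stated in full; the proofs are below) =====
def Claim_equal_construct_label_color_mapping : Prop := ∀ (labels : Option (List String)) (colors : List String), Dom_construct_label_color_mapping labels colors → Pre_construct_label_color_mapping labels colors → Spec_construct_label_color_mapping labels colors (construct_label_color_mapping labels colors)

-- ===== LEMMAS AND PROOFS =====

-- the colour assigned at position i
def pvColorAt (colors : List String) (i : Int) : String :=
  PySem.List.pyGetD colors (PySem.Int.mod i (colors.length : Int)) ""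

-- the dict either program has built after having assigned exactly the distinct labels u (in order)
def pvMkd (colors : List String) (u : List String) : PySem.Dict String String :=
  PySem.Dict.mk ((PySem.List.enumerate u 0).map (fun p => (p.2, pvColorAt colors p.1)))

lemma pvMkd_keys (colors : List String) (u : List String) :
    (pvMkd colors u).keys = u := by
  simp [pvMkd, PySem.Dict.keys, List.map_map, Function.comp_def]

lemma pvMkd_snoc (colors : List String) (u : List String) (l : String) (hl : l ∉ u) :
    (pvMkd colors u).insert l (pvColorAt colors ((pvMkd colors u).size : Int))
      = pvMkd colors (u ++ [l]) := by
  have hc : (pvMkd colors u).contains l = false := by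
    rw [← Bool.not_eq_true, PySem.Dict.contains_iff_mem_keys, pvMkd_keys]; exact hl
  apply PySem.Dict.ext
  rw [PySem.Dict.items_insert_of_not_contains _ _ hc]
  have hsize : (pvMkd colors u).size = u.length := by
    simp [pvMkd, PySem.Dict.size, PySem.List.length_enumerate]
  rw [hsize]
  simp [pvMkd, PySem.List.enumerate_append]

-- A's loop, characterised
lemma pvLoop (colors : List String) (ls u : List String) (hu : u.Nodup) :
    (ls.foldl (fun d l =>
        if !(d.contains l) then
          d.insert l (PySem.List.pyGetD colors (PySem.Int.mod (d.size : Int) (colors.length : Int)) "")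
        else d) (pvMkd colors u))
      = pvMkd colors (PySem.Set.update u ls) := by
  induction ls generalizing u with
  | nil => simp [PySem.Set.update]
  | cons l ls ih =>
    rw [List.foldl_cons, PySem.Set.update_cons]
    by_cases hmem : l ∈ u
    · have hc : (pvMkd colors u).contains l = true := by
        rw [PySem.Dict.contains_iff_mem_keys, pvMkd_keys]; exact hmem
      simp only [hc, Bool.not_true, Bool.false_eq_true, if_false]
      rw [PySem.Set.add_of_mem hmem]
      exact ih u hu
    · have hc : (pvMkd colors u).contains l = false := by
        rw [← Bool.not_eq_true, PySem.Dict.contains_iff_mem_keys, pvMkd_keys]; exact hmem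
      simp only [hc, Bool.not_false, if_true]
      rw [PySem.Set.add_of_not_mem hmem]
      rw [show (PySem.List.pyGetD colors (PySem.Int.mod ((pvMkd colors u).size : Int) (colors.length : Int)) "")
            = pvColorAt colors ((pvMkd colors u).size : Int) from rfl,
          pvMkd_snoc colors u l hmem]
      exact ih (u ++ [l]) (by simp [List.nodup_append, hu]; exact fun a ha h => hmem (h ▸ ha))

-- filtering out an element already in the set does not change Set.update
lemma pvUpdate_filter {s : List String} (x : String) (hx : x ∈ s) (ys : List String) :
    PySem.Set.update s (ys.filter (fun l => !(l == x))) = PySem.Set.update s ys := by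
  induction ys generalizing s with
  | nil => rfl
  | cons y ys ih =>
    by_cases hyx : y = x
    · subst hyx
      rw [List.filter_cons_of_neg (by simp), PySem.Set.update_cons, PySem.Set.add_of_mem hx]
      exact ih hx
    · rw [List.filter_cons_of_pos (by simp [hyx]), PySem.Set.update_cons, PySem.Set.update_cons]
      exact ih (by simp [PySem.Set.mem_add]; exact Or.inl hx)

-- updating past a fixed head passes through, when the head never recurs
lemma pvUpdate_cons_of_ne (a : String) (ys : List String) (hne : ∀ y ∈ ys, y ≠ a) (s : List String) :
    PySem.Set.update (a :: s) ys = a :: PySem.Set.update s ys := by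
  induction ys generalizing s with
  | nil => rfl
  | cons y ys ih =>
    have hya : y ≠ a := hne y (by simp)
    rw [PySem.Set.update_cons, PySem.Set.update_cons]
    have hadd : PySem.Set.add (a :: s) y = a :: PySem.Set.add s y := by
      rw [PySem.Set.add_eq_ite, PySem.Set.add_eq_ite]
      simp [List.mem_cons, hya]
      split <;> simp
    rw [hadd]
    exact ih (fun z hz => hne z (by simp [hz])) (PySem.Set.add s y)

-- first-occurrence dedup, one worklist step
lemma pvDedup_cons (h : String) (t : List String) :
    PySem.List.dedup (h :: t) = h :: PySem.List.dedup (t.filter (fun l => !(l == h))) := by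
  have h1 : PySem.List.dedup (h :: t) = PySem.Set.update [h] t := by
    simp [PySem.List.dedup_eq_ofList, PySem.Set.ofList_eq_foldl, PySem.Set.update]
  rw [h1, ← pvUpdate_filter h (by simp) t,
      pvUpdate_cons_of_ne h _ (fun y hy => by simpa using (List.of_mem_filter hy)) []]
  rw [PySem.List.dedup_eq_ofList, PySem.Set.ofList_eq_foldl]
  rfl

-- B's worklist loop, characterised
lemma pvWorklistLoop (colors : List String) :
    ∀ (n : Nat) (rest u : List String), rest.length ≤ n → u.Nodup → (∀ x ∈ rest, x ∉ u) →
      pvWorklist colors rest (u.length : Int) (pvMkd colors u)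
        = pvMkd colors (u ++ PySem.List.dedup rest) := by
  intro n
  induction n with
  | zero =>
    intro rest u hlen _ _
    have : rest = [] := List.length_eq_zero_iff.mp (Nat.le_zero.mp hlen)
    subst this
    rw [pvWorklist]
    simp
  | succ n ih =>
    intro rest u hlen hu hdisj
    cases rest with
    | nil =>
      rw [pvWorklist]
      simp
    | cons h t =>
      rw [pvWorklist]
      have hhu : h ∉ u := hdisj h (by simp)
      have hsize : ((pvMkd colors u).size : Int) = (u.length : Int) := by
        simp [pvMkd, PySem.Dict.size, PySem.List.length_enumerate]
      have hins : (pvMkd colors u).insert h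
          (PySem.List.pyGetD colors (PySem.Int.mod (u.length : Int) (colors.length : Int)) "")
          = pvMkd colors (u ++ [h]) := by
        have := pvMkd_snoc colors u h hhu
        rw [hsize] at this
        exact this
      rw [hins]
      have hlen' : (t.filter (fun l => !(l == h))).length ≤ n := by
        have := List.length_filter_le (fun l => !(l == h)) t
        simp only [List.length_cons] at hlen
        omega
      have hstep := ih (t.filter (fun l => !(l == h))) (u ++ [h]) hlen'
        (by simp [List.nodup_append, hu]; exact fun a ha hEq => hhu (hEq ▸ ha))
        (by
          intro x hx
          have hxt : x ∈ t := List.mem_of_mem_filter hx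
          have hxh : x ≠ h := by simpa using (List.of_mem_filter hx)
          simp [List.mem_append, hxh]
          exact hdisj x (by simp [hxt]))
      have hk : (u.length : Int) + 1 = ((u ++ [h]).length : Int) := by
        simp
      rw [hk, hstep, pvDedup_cons, List.append_assoc]
      rfl

theorem construct_label_color_mapping_spec : Claim_equal_construct_label_color_mapping := by
  intro labels colors _ _
  unfold Spec_construct_label_color_mapping
  cases labels with
  | none => rfl
  | some ls =>
    simp only [construct_label_color_mapping, construct_label_color_mapping_alt]
    have h0 : (PySem.Dict.empty : PySem.Dict String String) = pvMkd colors [] := by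
      simp [pvMkd, PySem.Dict.empty, PySem.List.enumerate]
    rw [h0, pvLoop colors ls [] List.nodup_nil]
    have hB := pvWorklistLoop colors ls.length ls [] (le_refl _) List.nodup_nil (by simp)
    simp only [List.length_nil, Nat.cast_zero, List.nil_append] at hB
    rw [hB]
    have : PySem.Set.update ([] : List String) ls = PySem.List.dedup ls := by
      rw [PySem.Set.update_nil_left]; simp
    rw [this]
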